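-- pv_equiv track=rewrite | github.com/LNiggl/grouptheory_toolkit | groups.py | remove_I
-- ===== SOURCE A (Python) =====
-- def remove_I(A):                    #remove excess "I"s to make keys less ambiguous
--     if A == "I":
--         return A
--     B = ""
--     for i in range(len(A)):
--         if not A[i] == "I":
--             B += A[i]
--         else:
--             if not i == len(A) - 1:
--                 if A[i+1] == "n":               # written for the case that the only other operation with "I" in its name is "Inv"
--                     B+= A[i]
--     return B
-- ===== SOURCE B (Python) =====
-- def remove_I(A):                    # encode-strip-decode: three staged replace passes instead of an index loop
--     if A == "I":
--         return A
--     return A.replace("In", "\x01").replace("I", "").replace("\x01", "In")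
-- ===== Notes on version B (the rewrite author's own statement) =====
-- stated objective: alternative
-- what changed: Replaces A's index loop with manual next-character peeking and repeated concatenation by an encode-strip-decode strategy: protect every occurrence of the two-char marker behind a placeholder, delete all remaining 'I's, then restore the placeholders, in three staged str.replace passes.
import Mathlib
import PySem

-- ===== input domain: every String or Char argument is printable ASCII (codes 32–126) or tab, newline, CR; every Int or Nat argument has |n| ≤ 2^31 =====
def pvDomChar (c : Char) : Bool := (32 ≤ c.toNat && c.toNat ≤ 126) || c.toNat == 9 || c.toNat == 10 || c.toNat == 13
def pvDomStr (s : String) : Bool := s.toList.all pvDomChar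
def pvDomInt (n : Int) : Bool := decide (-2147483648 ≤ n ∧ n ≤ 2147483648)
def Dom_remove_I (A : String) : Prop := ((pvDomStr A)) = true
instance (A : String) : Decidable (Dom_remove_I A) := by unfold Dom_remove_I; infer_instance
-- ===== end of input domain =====

-- B replaces A's index loop with an encode-strip-decode strategy: protect "In" behind a
-- placeholder, delete all remaining "I"s, restore the placeholders (three staged replace passes).

-- ===== PORT A =====
def remove_I (A : String) : String :=
  if A = "I" then A
  else
    String.mk ((PySem.List.pyRange 0 (PySem.Str.len A) 1).foldl (fun (B : List Char) (i : Int) =>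
      match PySem.Str.pyGet? A i with
      | none => B   -- unreachable: i is in range
      | some c =>
        if ¬ (c = 'I') then B ++ [c]
        else if ¬ (i = PySem.Str.len A - 1) then
          match PySem.Str.pyGet? A (i + 1) with
          | none => B   -- unreachable
          | some c2 => if c2 = 'n' then B ++ [c] else B
        else B) [])

-- ===== PORT B =====
def remove_I_alt (A : String) : String :=
  if A = "I" then A
  else
    PySem.Str.replace (PySem.Str.replace (PySem.Str.replace A "In" "\x01") "I" "") "\x01" "In"

-- ===== PRECONDITION & SPEC =====
def Spec_remove_I (A : String) (out : String) : Prop := out = remove_I_alt A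
instance (A : String) (out : String) : Decidable (Spec_remove_I A out) := by unfold Spec_remove_I; infer_instance

-- ===== CLAIM (what is proved, stated in full; the proofs are below) =====
def Claim_equal_remove_I : Prop := ∀ (A : String), Dom_remove_I A → Spec_remove_I A (remove_I A)

-- ===== LEMMAS AND PROOFS =====

-- the common characterisation: keep each char unless it is an 'I' not followed by 'n'
def bspec : List Char → List Char
  | [] => []
  | c :: rest =>
    if c != 'I' || (match rest with | [] => '\x00' | d :: _ => d) == 'n'
    then c :: bspec rest else bspec rest

-- recursive specification of Python's str.replace (old nonempty)
def replSpec (o : Char) (os new : List Char) : List Char → List Char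
  | [] => []
  | c :: t =>
    if (o :: os).isPrefixOf (c :: t)
    then new ++ replSpec o os new (List.drop os.length t)
    else c :: replSpec o os new t
termination_by l => l.length
decreasing_by
  all_goals simp

theorem go_spec (o : Char) (os new : List Char) :
    ∀ fuel l acc, l.length ≤ fuel →
      PySem.Chars.replace.go (o :: os) new fuel l acc = acc.reverse ++ replSpec o os new l := by
  intro fuel
  induction fuel with
  | zero =>
    intro l acc h
    have hl : l = [] := List.eq_nil_of_length_eq_zero (Nat.le_zero.mp h)
    subst hl
    simp [PySem.Chars.replace.go, replSpec]
  | succ n ih =>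
    intro l acc h
    cases l with
    | nil => simp [PySem.Chars.replace.go, replSpec]
    | cons c t =>
      by_cases hp : (o :: os).isPrefixOf (c :: t) = true
      · rw [show PySem.Chars.replace.go (o :: os) new (n+1) (c :: t) acc
            = PySem.Chars.replace.go (o :: os) new n (List.drop (o :: os).length (c :: t)) (new.reverse ++ acc) by
              simp [PySem.Chars.replace.go, hp]]
        rw [ih _ _ (by simp at h ⊢; omega)]
        rw [replSpec]
        simp [hp]
      · rw [show PySem.Chars.replace.go (o :: os) new (n+1) (c :: t) acc
            = PySem.Chars.replace.go (o :: os) new n t (c :: acc) by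
              simp [PySem.Chars.replace.go, hp]]
        rw [ih _ _ (by simp at h; omega)]
        rw [replSpec]
        simp [hp]

theorem replace_eq_replSpec (o : Char) (os new l : List Char) :
    PySem.Chars.replace l (o :: os) new = replSpec o os new l := by
  rw [PySem.Chars.replace]
  simp [go_spec o os new l.length l [] le_rfl]

-- the three staged passes compose to bspec on placeholder-free input
theorem comp_eq_bspec : ∀ n l, l.length ≤ n → '\x01' ∉ l →
    replSpec '\x01' [] ['I', 'n'] (replSpec 'I' [] [] (replSpec 'I' ['n'] ['\x01'] l)) = bspec l := by
  intro n
  induction n with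
  | zero =>
    intro l h _
    have hl : l = [] := List.eq_nil_of_length_eq_zero (Nat.le_zero.mp h)
    subst hl; simp [replSpec, bspec]
  | succ n ih =>
    intro l h hmem
    cases l with
    | nil => simp [replSpec, bspec]
    | cons c t =>
      by_cases hc : c = 'I'
      · subst hc
        cases t with
        | nil =>
          simp [replSpec, bspec]
        | cons d t' =>
          by_cases hd : d = 'n'
          · subst hd
            rw [show replSpec 'I' ['n'] ['\x01'] ('I' :: 'n' :: t')
                  = '\x01' :: replSpec 'I' ['n'] ['\x01'] t' by rw [replSpec]; simp [List.isPrefixOf]]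
            rw [show replSpec 'I' [] [] ('\x01' :: replSpec 'I' ['n'] ['\x01'] t')
                  = '\x01' :: replSpec 'I' [] [] (replSpec 'I' ['n'] ['\x01'] t') by rw [replSpec]; simp [List.isPrefixOf]]
            rw [show ∀ r, replSpec '\x01' [] ['I', 'n'] ('\x01' :: r)
                  = 'I' :: 'n' :: replSpec '\x01' [] ['I', 'n'] r by intro r; rw [replSpec]; simp [List.isPrefixOf]]
            rw [ih t' (by simp at h; omega) (by simp at hmem; tauto)]
            simp [bspec]
          · rw [show replSpec 'I' ['n'] ['\x01'] ('I' :: d :: t')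
                  = 'I' :: replSpec 'I' ['n'] ['\x01'] (d :: t') by rw [replSpec]; simp [List.isPrefixOf, hd, Ne.symm hd]]
            rw [show ∀ r, replSpec 'I' [] [] ('I' :: r) = replSpec 'I' [] [] r by
                  intro r; rw [replSpec]; simp [List.isPrefixOf]]
            rw [ih (d :: t') (by simp at h ⊢; omega) (by simp at hmem ⊢; tauto)]
            simp [bspec, hd]
      · have hx : c ≠ '\x01' := by simp at hmem; tauto
        rw [show replSpec 'I' ['n'] ['\x01'] (c :: t)
              = c :: replSpec 'I' ['n'] ['\x01'] t by rw [replSpec]; simp [List.isPrefixOf, hc, Ne.symm hc]]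
        rw [show ∀ r, replSpec 'I' [] [] (c :: r) = c :: replSpec 'I' [] [] r by
              intro r; rw [replSpec]; simp [List.isPrefixOf, hc, Ne.symm hc]]
        rw [show ∀ r, replSpec '\x01' [] ['I', 'n'] (c :: r) = c :: replSpec '\x01' [] ['I', 'n'] r by
              intro r; rw [replSpec]; simp [List.isPrefixOf, hx, Ne.symm hx]]
        rw [ih t (by simp at h; omega) (by simp at hmem; tauto)]
        cases t with
        | nil => simp [bspec, hc]
        | cons d t' => simp [bspec, hc]

-- A's loop computes bspec (invariant over the index range)
def stepF (cs : List Char) (B : List Char) (i : Int) : List Char :=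
  match PySem.Chars.pyGet? cs i with
  | none => B
  | some c =>
    if ¬ (c = 'I') then B ++ [c]
    else if ¬ (i = (((cs.length : Int))) - 1) then
      match PySem.Chars.pyGet? cs (i + 1) with
      | none => B
      | some c2 => if c2 = 'n' then B ++ [c] else B
    else B

theorem foldA_step (suf : List Char) : ∀ (pre acc : List Char),
    (PySem.List.pyRange (pre.length : Int) ((pre.length : Int) + suf.length) 1).foldl
      (stepF (pre ++ suf)) acc = acc ++ bspec suf := by
  induction suf with
  | nil => intro pre acc; rw [PySem.List.pyRange_one_eq_nil (by simp)]; simp [bspec]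
  | cons c rest ih =>
    intro pre acc
    rw [PySem.List.pyRange_one_cons (by push_cast [List.length_cons]; omega)]
    simp only [List.foldl_cons]
    have hget : PySem.Chars.pyGet? (pre ++ c :: rest) ((pre.length : Int)) = some c := by
      simpa [PySem.Chars.pyGet?] using PySem.List.pyGet?_append_length pre rest c
    have hlen2 : (((pre ++ [c]).length : Int)) = (pre.length : Int) + 1 := by
      push_cast [List.length_append, List.length_cons, List.length_nil]; ring
    have hIH := ih (pre ++ [c]) (stepF (pre ++ c :: rest) acc ((pre.length : Int)))
    rw [show (pre ++ [c]) ++ rest = pre ++ c :: rest by simp] at hIH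
    rw [hlen2] at hIH
    rw [show ((pre.length : Int) + ((c :: rest).length : Int)) = ((pre.length : Int) + 1 + (rest.length : Int)) by push_cast [List.length_cons]; ring]
    rw [hIH]
    rcases Decidable.em (c = 'I') with hc | hc
    · subst hc
      rcases rest with _ | ⟨d, rest'⟩
      · have hlast : stepF (pre ++ ['I']) acc ((pre.length : Int)) = acc := by
          simp [stepF]
        rw [hlast]; simp [bspec]
      · have hget2 : PySem.List.pyGet? (pre ++ 'I' :: d :: rest') ((pre.length : Int) + 1) = some d := by
          have h0 := PySem.List.pyGet?_append_length (pre ++ ['I']) rest' d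
          rw [show (pre ++ ['I']) ++ d :: rest' = pre ++ 'I' :: d :: rest' by simp] at h0
          rw [hlen2] at h0
          exact h0
        by_cases hd : d = 'n'
        · have hstep : stepF (pre ++ 'I' :: d :: rest') acc ((pre.length : Int)) = acc ++ ['I'] := by
            have hget2n := hget2; rw [hd] at hget2n
            simp [stepF, hd]
            rw [if_neg (by omega), hget2n]
            simp
          rw [hstep]; simp [bspec, hd]
        · have hstep : stepF (pre ++ 'I' :: d :: rest') acc ((pre.length : Int)) = acc := by
            simp [stepF]
            intro _
            rw [hget2]
            simp [hd]
          rw [hstep]; simp [bspec, hd]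
    · have hstep : stepF (pre ++ c :: rest) acc ((pre.length : Int)) = acc ++ [c] := by
        simp [stepF, hc]
      rw [hstep]; simp [bspec, hc]

theorem foldA (suf : List Char) : ∀ (pre acc : List Char),
    (PySem.List.pyRange (pre.length : Int) ((pre.length : Int) + suf.length) 1).foldl
      (fun (B : List Char) (i : Int) =>
        match PySem.Chars.pyGet? (pre ++ suf) i with
        | none => B
        | some c =>
          if ¬ (c = 'I') then B ++ [c]
          else if ¬ (i = (((pre ++ suf).length : Int)) - 1) then
            match PySem.Chars.pyGet? (pre ++ suf) (i + 1) with
            | none => B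
            | some c2 => if c2 = 'n' then B ++ [c] else B
          else B) acc = acc ++ bspec suf :=
  foldA_step suf

-- ===== VERDICT (by name: the statement is the Claim_ definition above) =====
theorem remove_I_spec : Claim_equal_remove_I := by
  intro A hdom
  unfold Spec_remove_I remove_I remove_I_alt
  split
  · rfl
  · apply String.toList_inj.mp
    have hx : '\x01' ∉ A.toList := by
      intro hmem
      have := List.all_eq_true.mp hdom _ hmem
      simp [pvDomChar] at this
    have hB : (PySem.Str.replace (PySem.Str.replace (PySem.Str.replace A "In" "\x01") "I" "") "\x01" "In").toList
        = bspec A.toList := by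
      simp only [PySem.Str.toList_replace]
      rw [show ("In" : String).toList = ['I', 'n'] from rfl,
          show ("\x01" : String).toList = ['\x01'] from rfl,
          show ("I" : String).toList = ['I'] from rfl,
          show ("" : String).toList = [] from rfl]
      rw [replace_eq_replSpec, replace_eq_replSpec, replace_eq_replSpec]
      exact comp_eq_bspec A.toList.length A.toList le_rfl hx
    rw [hB]
    simp only [PySem.Str.pyGet?_eq, PySem.Str.len_eq]
    have h := foldA A.toList [] []
    simp only [List.length_nil, Int.natCast_zero, List.nil_append, zero_add] at h
    rw [show (PySem.List.pyRange 0 ((A.toList.length : Int)) 1) = (PySem.List.pyRange 0 ((A.toList.length : Int))) from rfl] at *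
    simp only [String.mk]
    rw [h]
    exact String.toList_ofList
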